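-- pv_equiv track=rewrite | github.com/kergene/advent-code | 2018/code_day_18.py | fast_forward
-- ===== SOURCE A (Python) =====
-- def take_step(data, n):
--     new_data = [row.copy() for row in data]
--     DIRECTIONS = (
--         (-1, -1), (-1,  0), (-1,  1),
--         ( 0, -1),           ( 0,  1),
--         ( 1, -1), ( 1,  0), ( 1,  1),
--     )
--     for r in range(n):
--         for c in range(n):
--             if data[r][c] == '.':
--                 trees = 0
--                 for dr, dc in DIRECTIONS:
--                     a, b = r + dr, c + dc
--                     if 0 <= a < n and 0 <= b < n:
--                         if data[a][b] == '|':
--                             trees += 1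
--                 if trees >= 3:
--                     new_data[r][c] = '|'
--             elif data[r][c] == '|':
--                 lumbers = 0
--                 for dr, dc in DIRECTIONS:
--                     a, b = r + dr, c + dc
--                     if 0 <= a < n and 0 <= b < n:
--                         if data[a][b] == '#':
--                             lumbers += 1
--                 if lumbers >= 3:
--                     new_data[r][c] = '#'
--             elif data[r][c] == '#':
--                 trees = lumbers = 0
--                 for dr, dc in DIRECTIONS:
--                     a, b = r + dr, c + dc
--                     if 0 <= a < n and 0 <= b < n:
--                         if data[a][b] == '|':
--                             trees += 1
--                         elif data[a][b] == '#':
--                             lumbers += 1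
--                 if trees == 0 or lumbers == 0:
--                     new_data[r][c] = '.'
--             else:
--                 assert False, data[r][c]
--     return new_data
--
-- def resource_value(data):
--     woodlands = lumberyards = 0
--     for row in data:
--         for acre in row:
--             if acre == '|':
--                 woodlands += 1
--             elif acre == '#':
--                 lumberyards += 1
--     return woodlands * lumberyards
--
-- def fast_forward(data):
--     n = len(data)
--     seens = {}
--     minute = 0
--     while True:
--         hashable = ''.join(''.join(row) for row in data)
--         if hashable in seens:
--             first = seens[hashable]
--             second = minute
--             break
--         else:
--             seens[hashable] = minute
--             minute += 1
--             data = take_step(data, n)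
--     gap = second - first
--     remainder = (10 ** 9 - first) % gap
--     for _ in range(remainder):
--         data = take_step(data, n)
--     return resource_value(data)
-- ===== SOURCE B (Python) =====
-- def take_step(data, n):
--     DIRECTIONS = (
--         (-1, -1), (-1,  0), (-1,  1),
--         ( 0, -1),           ( 0,  1),
--         ( 1, -1), ( 1,  0), ( 1,  1),
--     )
--     # Pass 1: scatter — each tree/lumberyard cell adds 1 to the relevant
--     # neighbour-count of every in-bounds neighbour position.
--     trees = {}
--     lumbers = {}
--     for r in range(n):
--         for c in range(n):
--             cell = data[r][c]
--             if cell == '|' or cell == '#':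
--                 counts = trees if cell == '|' else lumbers
--                 for dr, dc in DIRECTIONS:
--                     a, b = r + dr, c + dc
--                     if 0 <= a < n and 0 <= b < n:
--                         counts[(a, b)] = counts.get((a, b), 0) + 1
--     # Pass 2: apply the transition rules from the precomputed counts.
--     new_data = [row.copy() for row in data]
--     for r in range(n):
--         for c in range(n):
--             cell = data[r][c]
--             t = trees.get((r, c), 0)
--             l = lumbers.get((r, c), 0)
--             if cell == '.':
--                 new_data[r][c] = '|' if t >= 3 else '.'
--             elif cell == '|':
--                 new_data[r][c] = '#' if l >= 3 else '|'
--             elif cell == '#':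
--                 new_data[r][c] = '.' if t == 0 or l == 0 else '#'
--             else:
--                 assert False, cell
--     return new_data
--
-- def resource_value(data):
--     woodlands = lumberyards = 0
--     for row in data:
--         for acre in row:
--             if acre == '|':
--                 woodlands += 1
--             elif acre == '#':
--                 lumberyards += 1
--     return woodlands * lumberyards
--
-- def fast_forward(data):
--     n = len(data)
--     seens = {}
--     minute = 0
--     while True:
--         hashable = ''.join(''.join(row) for row in data)
--         if hashable in seens:
--             first = seens[hashable]
--             second = minute
--             break
--         else:
--             seens[hashable] = minute
--             minute += 1
--             data = take_step(data, n)
--     gap = second - first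
--     remainder = (10 ** 9 - first) % gap
--     for _ in range(remainder):
--         data = take_step(data, n)
--     return resource_value(data)
-- ===== Notes on version B (the rewrite author's own statement) =====
-- stated objective: alternative
-- what changed: take_step is rewritten from a gather (each cell re-scans its 8 neighbours inside its branch) to a two-pass scatter: pass 1 walks the grid once and has every '|'/'#' cell add 1 to a tree-/lumber-count dictionary entry of each in-bounds neighbour; pass 2 applies the three transition rules to the precomputed counts; the cycle-detection loop of fast_forward is unchanged.
import Mathlib
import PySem

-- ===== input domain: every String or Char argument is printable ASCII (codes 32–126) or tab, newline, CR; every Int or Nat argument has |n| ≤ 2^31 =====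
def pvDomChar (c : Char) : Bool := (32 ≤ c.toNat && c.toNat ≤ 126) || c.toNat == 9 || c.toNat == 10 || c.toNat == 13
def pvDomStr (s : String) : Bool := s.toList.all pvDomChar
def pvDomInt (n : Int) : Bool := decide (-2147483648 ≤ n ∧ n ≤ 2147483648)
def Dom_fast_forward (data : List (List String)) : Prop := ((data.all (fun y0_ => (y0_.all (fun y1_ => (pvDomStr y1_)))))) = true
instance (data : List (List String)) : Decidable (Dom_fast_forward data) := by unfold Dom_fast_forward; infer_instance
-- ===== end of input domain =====

-- B rewrites take_step from a per-cell neighbour gather into a two-pass scatter (neighbour-count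
-- dictionaries built in one pass, rules applied from them in a second); the cycle-detection loop is kept.

-- ===== shared helpers (identical lines of Source A and Source B) =====

-- DIRECTIONS
def pvDirs : List (Int × Int) :=
  [(-1, -1), (-1, 0), (-1, 1), (0, -1), (0, 1), (1, -1), (1, 0), (1, 1)]

-- '0 <= a < n and 0 <= b < n'
def pvInb (n a b : Int) : Bool :=
  decide (0 ≤ a) && decide (a < n) && decide (0 ≤ b) && decide (b < n)

-- 'data[r][c]' (the defaults are never read on inputs satisfying Pre_: all accesses are in range there)
def pvCell (data : List (List String)) (r c : Int) : String :=
  PySem.List.pyGetD (PySem.List.pyGetD data r []) c ""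

-- resource_value (identical helper in both sources)
def pvResource (data : List (List String)) : Int :=
  let wl := data.foldl (fun wl row =>
    row.foldl (fun wl acre =>
      if acre == "|" then (wl.1 + 1, wl.2)
      else if acre == "#" then (wl.1, wl.2 + 1)
      else wl) wl) ((0 : Int), (0 : Int))
  wl.1 * wl.2

-- ''.join(''.join(row) for row in data)
def pvHash (data : List (List String)) : String :=
  PySem.Str.join "" (data.map (fun row => PySem.Str.join "" row))

-- totality fuel for the 'while True' cycle-detection loop: on inputs satisfying Pre_ every cell of every
-- reachable grid is one of 3 characters, so at most 3^(#cells) distinct grids exist and the loop breaks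
-- within that many iterations; the fuel is never exhausted there (both ports use the identical guard).
def pvFuel (data : List (List String)) : Nat := 3 ^ (data.map List.length).sum + 2

-- ===== PORT A =====

-- the '.'-branch gather loop ('trees')
def pvTreesA (data : List (List String)) (n r c : Int) : Int :=
  pvDirs.foldl (fun acc d =>
    let a := r + d.1
    let b := c + d.2
    if pvInb n a b then (if pvCell data a b == "|" then acc + 1 else acc) else acc) 0

-- the '|'-branch gather loop ('lumbers')
def pvLumbersA (data : List (List String)) (n r c : Int) : Int :=
  pvDirs.foldl (fun acc d =>
    let a := r + d.1
    let b := c + d.2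
    if pvInb n a b then (if pvCell data a b == "#" then acc + 1 else acc) else acc) 0

-- the '#'-branch gather loop (counts both 'trees' and 'lumbers' with an elif)
def pvBothA (data : List (List String)) (n r c : Int) : Int × Int :=
  pvDirs.foldl (fun tl d =>
    let a := r + d.1
    let b := c + d.2
    if pvInb n a b then
      (if pvCell data a b == "|" then (tl.1 + 1, tl.2)
       else if pvCell data a b == "#" then (tl.1, tl.2 + 1)
       else tl)
    else tl) ((0 : Int), (0 : Int))

-- 'new_data[r][c] = v'
def pvSetCell (nd : List (List String)) (r c : Int) (v : String) : List (List String) :=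
  PySem.List.pySetD nd r (PySem.List.pySetD (PySem.List.pyGetD nd r []) c v)

def pvTakeStepA (data : List (List String)) (n : Int) : List (List String) :=
  let new0 := data.map (fun row => row)   -- [row.copy() for row in data]
  (PySem.List.pyRange 0 n 1).foldl (fun nd r =>
    (PySem.List.pyRange 0 n 1).foldl (fun nd c =>
      let cell := pvCell data r c
      if cell == "." then
        (if pvTreesA data n r c ≥ 3 then pvSetCell nd r c "|" else nd)
      else if cell == "|" then
        (if pvLumbersA data n r c ≥ 3 then pvSetCell nd r c "#" else nd)
      else if cell == "#" then
        (let tl := pvBothA data n r c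
         if tl.1 == 0 || tl.2 == 0 then pvSetCell nd r c "." else nd)
      else nd   -- Python: 'assert False' raises here; unreachable on inputs satisfying Pre_
      ) nd) new0

-- the 'while True' loop; returns (data at break, first, second)
def pvLoopA : Nat → PySem.Dict String Int → Int → List (List String) → Int →
    List (List String) × Int × Int
  | 0, _, _, data, _ => (data, 0, 1)   -- fuel guard, never reached on inputs satisfying Pre_
  | fuel + 1, seens, minute, data, n =>
    let h := pvHash data
    match seens.get? h with
    | some first => (data, first, minute)
    | none => pvLoopA fuel (seens.insert h minute) (minute + 1) (pvTakeStepA data n) n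

def fast_forward (data : List (List String)) : Int :=
  let n : Int := data.length
  let res := pvLoopA (pvFuel data) PySem.Dict.empty 0 data n
  let first := res.2.1
  let second := res.2.2
  let gap := second - first
  let remainder := PySem.Int.mod (10 ^ 9 - first) gap
  let final := (PySem.List.pyRange 0 remainder 1).foldl (fun d _ => pvTakeStepA d n) res.1
  pvResource final

-- ===== PORT B =====

-- the inner scatter loop: one '|'/'#' cell adds 1 to each in-bounds neighbour's count
def pvScatOne (n r c : Int) (d : PySem.Dict (Int × Int) Int) : PySem.Dict (Int × Int) Int :=
  pvDirs.foldl (fun d dd =>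
    let a := r + dd.1
    let b := c + dd.2
    if pvInb n a b then d.insert (a, b) (d.getD (a, b) 0 + 1) else d) d

-- pass 1: build the (trees, lumbers) neighbour-count dictionaries
def pvScatter (data : List (List String)) (n : Int) :
    PySem.Dict (Int × Int) Int × PySem.Dict (Int × Int) Int :=
  (PySem.List.pyRange 0 n 1).foldl (fun tl r =>
    (PySem.List.pyRange 0 n 1).foldl (fun tl c =>
      let cell := pvCell data r c
      if cell == "|" then (pvScatOne n r c tl.1, tl.2)
      else if cell == "#" then (tl.1, pvScatOne n r c tl.2)
      else tl) tl) (PySem.Dict.empty, PySem.Dict.empty)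

def pvTakeStepB (data : List (List String)) (n : Int) : List (List String) :=
  let tl := pvScatter data n
  -- pass 2: copy the grid, then apply the transition rules from the precomputed counts
  let new0 := data.map (fun row => row)   -- [row.copy() for row in data]
  (PySem.List.pyRange 0 n 1).foldl (fun nd r =>
    (PySem.List.pyRange 0 n 1).foldl (fun nd c =>
      let cell := pvCell data r c
      let t := tl.1.getD (r, c) 0
      let l := tl.2.getD (r, c) 0
      if cell == "." then pvSetCell nd r c (if t ≥ 3 then "|" else ".")
      else if cell == "|" then pvSetCell nd r c (if l ≥ 3 then "#" else "|")
      else if cell == "#" then pvSetCell nd r c (if t == 0 || l == 0 then "." else "#")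
      else nd   -- Python: 'assert False' raises here; unreachable on inputs satisfying Pre_
      ) nd) new0

def pvLoopB : Nat → PySem.Dict String Int → Int → List (List String) → Int →
    List (List String) × Int × Int
  | 0, _, _, data, _ => (data, 0, 1)   -- fuel guard, never reached on inputs satisfying Pre_
  | fuel + 1, seens, minute, data, n =>
    let h := pvHash data
    match seens.get? h with
    | some first => (data, first, minute)
    | none => pvLoopB fuel (seens.insert h minute) (minute + 1) (pvTakeStepB data n) n

def fast_forward_alt (data : List (List String)) : Int :=
  let n : Int := data.length
  let res := pvLoopB (pvFuel data) PySem.Dict.empty 0 data n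
  let first := res.2.1
  let second := res.2.2
  let gap := second - first
  let remainder := PySem.Int.mod (10 ^ 9 - first) gap
  let final := (PySem.List.pyRange 0 remainder 1).foldl (fun d _ => pvTakeStepB d n) res.1
  pvResource final

-- ===== PRECONDITION & SPEC =====

-- Pre_ admits exactly the inputs on which A returns: every row has at least len(data) cells and the
-- n×n block (n = len(data)) holds only '.', '|', '#'; elsewhere A raises IndexError (a row shorter
-- than len(data)) or AssertionError (any other cell value inside the block).
def Pre_fast_forward (data : List (List String)) : Prop :=
  ∀ row ∈ data, data.length ≤ row.length ∧
    ∀ s ∈ row.take data.length, s = "." ∨ s = "|" ∨ s = "#"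
instance (data : List (List String)) : Decidable (Pre_fast_forward data) := by
  unfold Pre_fast_forward; infer_instance

def pvWitness_fast_forward : List (List String) := [[".", "|"], ["#", "|"]]

def Spec_fast_forward (data : List (List String)) (out : Int) : Prop := out = fast_forward_alt data
instance (data : List (List String)) (out : Int) : Decidable (Spec_fast_forward data out) := by
  unfold Spec_fast_forward; infer_instance

-- ===== CLAIM (what is proved, stated in full; the proofs are below) =====
def Claim_equal_fast_forward : Prop :=
  ∀ (data : List (List String)), Dom_fast_forward data → Pre_fast_forward data →
    Spec_fast_forward data (fast_forward data)

-- ===== LEMMAS AND PROOFS =====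

-- the grid invariant maintained by the loop: n0 × n0, cells drawn from the three characters
def pvGood (n0 : Nat) (data : List (List String)) : Prop :=
  data.length = n0 ∧ ∀ row ∈ data, n0 ≤ row.length ∧
    ∀ s ∈ row.take n0, s = "." ∨ s = "|" ∨ s = "#"

-- the value A writes at (r, c), if any
def pvWrite (data : List (List String)) (n r c : Int) : Option String :=
  let cell := pvCell data r c
  if cell == "." then (if pvTreesA data n r c ≥ 3 then some "|" else none)
  else if cell == "|" then (if pvLumbersA data n r c ≥ 3 then some "#" else none)
  else if cell == "#" then
    (let tl := pvBothA data n r c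
     if tl.1 == 0 || tl.2 == 0 then some "." else none)
  else none

def pvIdxList (m : Nat) : List Int := List.map (fun (k : Nat) => (k : Int)) (List.range m)

theorem pvIdxList_succ (m : Nat) : pvIdxList (m + 1) = pvIdxList m ++ [(m : Int)] := by
  simp [pvIdxList, List.range_succ]

theorem pvRange_cast (n0 : Nat) :
    PySem.List.pyRange 0 (n0 : Int) 1 = pvIdxList n0 := by
  rw [PySem.List.pyRange_one]
  simp [pvIdxList, List.map_eq_flatMap]

theorem pvLen_pySetD {α : Type} (xs : List α) (i : Int) (v : α) :
    (PySem.List.pySetD xs i v).length = xs.length := by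
  unfold PySem.List.pySetD PySem.List.pySet?
  cases h : PySem.List.pyIdx? xs.length i <;> simp

theorem pvGetD_pySetD {α : Type} (xs : List α) (k m : Nat) (v d : α) (hk : k < xs.length)
    (_hm : m < xs.length) :
    (PySem.List.pySetD xs (k : Int) v).getD m d = if m = k then v else xs.getD m d := by
  have := PySem.List.pyGetD_pySetD_natCast xs k m v d hk
  simpa using this

theorem pvPySetD_eq_set {α : Type} (xs : List α) (k : Nat) (v : α) (hk : k < xs.length) :
    PySem.List.pySetD xs (k : Int) v = xs.set k v := by
  unfold PySem.List.pySetD PySem.List.pySet? PySem.List.pyIdx?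
  simp [hk]

theorem pvPySetD_self' {α : Type} (xs : List α) (k : Nat) (d : α) (hk : k < xs.length) :
    PySem.List.pySetD xs (k : Int) (xs.getD k d) = xs := by
  rw [pvPySetD_eq_set _ _ _ hk, List.getD_eq_getElem xs d hk, List.set_getElem_self hk]

-- a single conditional write, at the row level and at the grid level
def pvApplyW {α : Type} (o : Option α) (row : List α) (c : Int) : List α :=
  match o with
  | some v => PySem.List.pySetD row c v
  | none => row

def pvApplyWG {α : Type} (o : Option α) (nd : List (List α)) (r c : Int) : List (List α) :=
  match o with
  | some v => PySem.List.pySetD nd r (PySem.List.pySetD (PySem.List.pyGetD nd r []) c v)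
  | none => nd

theorem pvApplyW_none {α : Type} (row : List α) (c : Int) : pvApplyW none row c = row := rfl
theorem pvApplyW_some {α : Type} (v : α) (row : List α) (c : Int) :
    pvApplyW (some v) row c = PySem.List.pySetD row c v := rfl
theorem pvApplyWG_none {α : Type} (nd : List (List α)) (r c : Int) :
    pvApplyWG none nd r c = nd := rfl
theorem pvApplyWG_some {α : Type} (v : α) (nd : List (List α)) (r c : Int) :
    pvApplyWG (some v) nd r c
      = PySem.List.pySetD nd r (PySem.List.pySetD (PySem.List.pyGetD nd r []) c v) := rfl

theorem pvRowFold_length {α : Type} (w : Int → Option α) (C : List Int) (row : List α) :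
    (C.foldl (fun row c => pvApplyW (w c) row c) row).length = row.length := by
  induction C generalizing row with
  | nil => rfl
  | cons c C ih =>
    simp only [List.foldl_cons]
    cases hw : w c with
    | none => rw [pvApplyW_none]; exact ih row
    | some v => rw [pvApplyW_some, ih]; exact pvLen_pySetD row c v

theorem pvRowFold_getD {α : Type} (w : Int → Option α) (m : Nat) (row : List α) (d : α)
    (hm : m ≤ row.length) (j : Nat) (hj : j < row.length) :
    ((pvIdxList m).foldl (fun row c => pvApplyW (w c) row c) row).getD j d
    = if j < m then (w j).getD (row.getD j d) else row.getD j d := by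
  induction m with
  | zero => simp [pvIdxList]
  | succ m ih =>
    rw [pvIdxList_succ, List.foldl_append]
    have hlen := pvRowFold_length w (pvIdxList m) row
    have hm' : m ≤ row.length := Nat.le_of_succ_le hm
    simp only [List.foldl_cons, List.foldl_nil]
    cases hw : w (m : Int) with
    | none =>
      rw [pvApplyW_none, ih hm']
      by_cases h : j < m
      · simp [h, Nat.lt_succ_of_lt h]
      · by_cases h2 : j = m
        · subst h2; simp [hw]
        · have : ¬ j < m + 1 := by omega
          simp [h, this]
    | some v =>
      rw [pvApplyW_some, pvGetD_pySetD _ m j v d (by omega) (by omega), ih hm']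
      by_cases h2 : j = m
      · subst h2; simp [hw]
      · by_cases h : j < m
        · simp [h2, h, Nat.lt_succ_of_lt h]
        · have : ¬ j < m + 1 := by omega
          simp [h2, h, this]

theorem pvColFold_collapse {α : Type} (w : Int → Option α) (C : List Int)
    (nd : List (List α)) (r : Nat) (hr : r < nd.length) :
    C.foldl (fun nd c => pvApplyWG (w c) nd (r : Int) c) nd
    = PySem.List.pySetD nd (r : Int)
        (C.foldl (fun row c => pvApplyW (w c) row c) (PySem.List.pyGetD nd (r : Int) [])) := by
  induction C generalizing nd with
  | nil =>
    simp only [List.foldl_nil]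
    rw [PySem.List.pyGetD_natCast, pvPySetD_self' nd r [] hr]
  | cons c C ih =>
    simp only [List.foldl_cons]
    cases hw : w c with
    | none => rw [pvApplyWG_none, pvApplyW_none]; exact ih nd hr
    | some v =>
      rw [pvApplyWG_some, pvApplyW_some]
      have hlen : (PySem.List.pySetD nd (r : Int)
          (PySem.List.pySetD (PySem.List.pyGetD nd (r : Int) []) c v)).length = nd.length :=
        pvLen_pySetD _ _ _
      rw [ih _ (by omega)]
      have hget : PySem.List.pyGetD (PySem.List.pySetD nd (r : Int)
          (PySem.List.pySetD (PySem.List.pyGetD nd (r : Int) []) c v)) (r : Int) []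
          = PySem.List.pySetD (PySem.List.pyGetD nd (r : Int) []) c v := by
        rw [PySem.List.pyGetD_natCast]
        rw [pvGetD_pySetD nd r r _ [] hr hr]
        simp
      rw [hget]
      rw [pvPySetD_eq_set _ _ _ hr, pvPySetD_eq_set _ _ _ (by simpa [List.length_set] using hr),
        pvPySetD_eq_set _ _ _ hr, List.set_set]

-- pvCell at nonnegative indices
theorem pvCell_natCast (data : List (List String)) (i j : Nat) :
    pvCell data (i : Int) (j : Int) = (data.getD i []).getD j "" := by
  simp [pvCell]

-- A's inner-loop body, phrased through pvWrite
theorem pvBodyA_eq (data : List (List String)) (n r c : Int) (nd : List (List String)) :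
    (if pvCell data r c == "." then
       (if pvTreesA data n r c ≥ 3 then pvSetCell nd r c "|" else nd)
     else if pvCell data r c == "|" then
       (if pvLumbersA data n r c ≥ 3 then pvSetCell nd r c "#" else nd)
     else if pvCell data r c == "#" then
       (if (pvBothA data n r c).1 == 0 || (pvBothA data n r c).2 == 0 then pvSetCell nd r c "."
        else nd)
     else nd)
    = pvApplyWG (pvWrite data n r c) nd r c := by
  simp only [pvWrite, pvSetCell]
  split_ifs <;> rfl

-- the first m rows of A's double update loop, with A's literal body
def pvAFoldF (data : List (List String)) (n : Int) (n0 m : Nat) : List (List String) :=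
  (pvIdxList m).foldl (fun nd r =>
    (pvIdxList n0).foldl (fun nd c =>
      let cell := pvCell data r c
      if cell == "." then
        (if pvTreesA data n r c ≥ 3 then pvSetCell nd r c "|" else nd)
      else if cell == "|" then
        (if pvLumbersA data n r c ≥ 3 then pvSetCell nd r c "#" else nd)
      else if cell == "#" then
        (let tl := pvBothA data n r c
         if tl.1 == 0 || tl.2 == 0 then pvSetCell nd r c "." else nd)
      else nd) nd) data

-- the new row r, as A computes it from the old one
def pvRowA (data : List (List String)) (n : Int) (n0 : Nat) (r : Int) : List String :=
  (pvIdxList n0).foldl (fun row c => pvApplyW (pvWrite data n r c) row c)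
    (data.getD r.toNat [])

theorem pvAFold_spec (data : List (List String)) (n : Int) (n0 : Nat)
    (hlen : data.length = n0) (m : Nat) (hm : m ≤ n0) :
    (pvAFoldF data n n0 m).length = n0 ∧
      ∀ i, i < n0 → ∀ d, (pvAFoldF data n n0 m).getD i d =
        if i < m then pvRowA data n n0 (i : Int) else data.getD i d := by
  induction m with
  | zero => refine ⟨by simpa [pvAFoldF, pvIdxList] using hlen, ?_⟩
            intro i hi d; simp [pvAFoldF, pvIdxList]
  | succ m ih =>
    obtain ⟨ihlen, ihget⟩ := ih (Nat.le_of_succ_le hm)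
    have hm' : m < n0 := hm
    have hstep : pvAFoldF data n n0 (m + 1) =
        PySem.List.pySetD (pvAFoldF data n n0 m) (m : Int)
          ((pvIdxList n0).foldl (fun row c => pvApplyW (pvWrite data n (m : Int) c) row c)
            (PySem.List.pyGetD (pvAFoldF data n n0 m) (m : Int) [])) := by
      rw [pvAFoldF, pvIdxList_succ, List.foldl_append]
      rw [← pvAFoldF]
      simp only [List.foldl_cons, List.foldl_nil]
      refine Eq.trans (PySem.List.foldl_congr_mem _ _
        (fun nd c => pvApplyWG (pvWrite data n (m : Int) c) nd (m : Int) c) _ ?_)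
        (pvColFold_collapse (pvWrite data n (m : Int)) (pvIdxList n0) (pvAFoldF data n n0 m) m
          (by rw [ihlen]; exact hm'))
      intro acc x _
      exact pvBodyA_eq data n (m : Int) x acc
    have hget0 : PySem.List.pyGetD (pvAFoldF data n n0 m) (m : Int) [] = data.getD m [] := by
      rw [PySem.List.pyGetD_natCast, ihget m hm' []]
      simp
    refine ⟨by rw [hstep]; rw [pvLen_pySetD]; exact ihlen, ?_⟩
    intro i hi d
    rw [hstep, hget0]
    rw [pvGetD_pySetD _ m i _ d (by omega) (by omega)]
    by_cases him : i = m
    · subst him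
      simp [pvRowA]
    · rw [if_neg him, ihget i hi d]
      by_cases hlt : i < m
      · rw [if_pos hlt, if_pos (by omega)]
      · rw [if_neg hlt, if_neg (by omega)]

theorem pvTakeStepA_eq_fold (data : List (List String)) (n0 : Nat) :
    pvTakeStepA data (n0 : Int) = pvAFoldF data (n0 : Int) n0 n0 := by
  unfold pvTakeStepA pvAFoldF
  rw [pvRange_cast, List.map_id']

-- the value B writes at (r, c)
def pvWriteB (data : List (List String)) (n r c : Int) : Option String :=
  let cell := pvCell data r c
  let t := (pvScatter data n).1.getD (r, c) 0
  let l := (pvScatter data n).2.getD (r, c) 0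
  if cell == "." then some (if t ≥ 3 then "|" else ".")
  else if cell == "|" then some (if l ≥ 3 then "#" else "|")
  else if cell == "#" then some (if t == 0 || l == 0 then "." else "#")
  else none

-- B's inner-loop body, phrased through pvWriteB
theorem pvBodyB_eq (data : List (List String)) (n r c : Int) (nd : List (List String)) :
    (if pvCell data r c == "." then
       pvSetCell nd r c (if (pvScatter data n).1.getD (r, c) 0 ≥ 3 then "|" else ".")
     else if pvCell data r c == "|" then
       pvSetCell nd r c (if (pvScatter data n).2.getD (r, c) 0 ≥ 3 then "#" else "|")
     else if pvCell data r c == "#" then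
       pvSetCell nd r c (if (pvScatter data n).1.getD (r, c) 0 == 0
           || (pvScatter data n).2.getD (r, c) 0 == 0 then "." else "#")
     else nd)
    = pvApplyWG (pvWriteB data n r c) nd r c := by
  simp only [pvWriteB, pvSetCell]
  split_ifs <;> rfl

-- the first m rows of B's update loop, with B's literal body
def pvBFoldF (data : List (List String)) (n : Int) (n0 m : Nat) : List (List String) :=
  (pvIdxList m).foldl (fun nd r =>
    (pvIdxList n0).foldl (fun nd c =>
      let cell := pvCell data r c
      let t := (pvScatter data n).1.getD (r, c) 0
      let l := (pvScatter data n).2.getD (r, c) 0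
      if cell == "." then pvSetCell nd r c (if t ≥ 3 then "|" else ".")
      else if cell == "|" then pvSetCell nd r c (if l ≥ 3 then "#" else "|")
      else if cell == "#" then pvSetCell nd r c (if t == 0 || l == 0 then "." else "#")
      else nd) nd) data

-- the new row r, as B computes it from the old one
def pvRowB (data : List (List String)) (n : Int) (n0 : Nat) (r : Int) : List String :=
  (pvIdxList n0).foldl (fun row c => pvApplyW (pvWriteB data n r c) row c)
    (data.getD r.toNat [])

theorem pvBFold_spec (data : List (List String)) (n : Int) (n0 : Nat)
    (hlen : data.length = n0) (m : Nat) (hm : m ≤ n0) :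
    (pvBFoldF data n n0 m).length = n0 ∧
      ∀ i, i < n0 → ∀ d, (pvBFoldF data n n0 m).getD i d =
        if i < m then pvRowB data n n0 (i : Int) else data.getD i d := by
  induction m with
  | zero => refine ⟨by simpa [pvBFoldF, pvIdxList] using hlen, ?_⟩
            intro i hi d; simp [pvBFoldF, pvIdxList]
  | succ m ih =>
    obtain ⟨ihlen, ihget⟩ := ih (Nat.le_of_succ_le hm)
    have hm' : m < n0 := hm
    have hstep : pvBFoldF data n n0 (m + 1) =
        PySem.List.pySetD (pvBFoldF data n n0 m) (m : Int)
          ((pvIdxList n0).foldl (fun row c => pvApplyW (pvWriteB data n (m : Int) c) row c)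
            (PySem.List.pyGetD (pvBFoldF data n n0 m) (m : Int) [])) := by
      rw [pvBFoldF, pvIdxList_succ, List.foldl_append]
      rw [← pvBFoldF]
      simp only [List.foldl_cons, List.foldl_nil]
      refine Eq.trans (PySem.List.foldl_congr_mem _ _
        (fun nd c => pvApplyWG (pvWriteB data n (m : Int) c) nd (m : Int) c) _ ?_)
        (by exact pvColFold_collapse (pvWriteB data n (m : Int)) (pvIdxList n0) (pvBFoldF data n n0 m) m (by rw [ihlen]; exact hm'))
      intro acc x _
      exact pvBodyB_eq data n (m : Int) x acc
    have hget0 : PySem.List.pyGetD (pvBFoldF data n n0 m) (m : Int) [] = data.getD m [] := by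
      rw [PySem.List.pyGetD_natCast, ihget m hm' []]
      simp
    refine ⟨by rw [hstep]; rw [pvLen_pySetD]; exact ihlen, ?_⟩
    intro i hi d
    rw [hstep, hget0]
    rw [pvGetD_pySetD _ m i _ d (by omega) (by omega)]
    by_cases him : i = m
    · subst him
      simp [pvRowB]
    · rw [if_neg him, ihget i hi d]
      by_cases hlt : i < m
      · rw [if_pos hlt, if_pos (by omega)]
      · rw [if_neg hlt, if_neg (by omega)]

theorem pvTakeStepB_eq_fold (data : List (List String)) (n0 : Nat) :
    pvTakeStepB data (n0 : Int) = pvBFoldF data (n0 : Int) n0 n0 := by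
  unfold pvTakeStepB pvBFoldF
  rw [pvRange_cast, List.map_id']

theorem pvGood_row (data : List (List String)) (n0 : Nat) (hg : pvGood n0 data) (r : Nat)
    (hr : r < n0) :
    n0 ≤ (data.getD r []).length ∧
      ∀ s ∈ (data.getD r []).take n0, s = "." ∨ s = "|" ∨ s = "#" := by
  obtain ⟨hlen, hrows⟩ := hg
  have hrl : r < data.length := by omega
  rw [List.getD_eq_getElem data [] hrl]
  exact hrows data[r] (List.getElem_mem hrl)

theorem pvBoth_split (data : List (List String)) (n r c : Int) (L : List (Int × Int))
    (t0 l0 : Int) :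
    L.foldl (fun tl d =>
      let a := r + d.1
      let b := c + d.2
      if pvInb n a b then
        (if pvCell data a b == "|" then (tl.1 + 1, tl.2)
         else if pvCell data a b == "#" then (tl.1, tl.2 + 1)
         else tl)
      else tl) (t0, l0)
    = (L.foldl (fun acc d =>
        let a := r + d.1
        let b := c + d.2
        if pvInb n a b then (if pvCell data a b == "|" then acc + 1 else acc) else acc) t0,
       L.foldl (fun acc d =>
        let a := r + d.1
        let b := c + d.2
        if pvInb n a b then (if pvCell data a b == "#" then acc + 1 else acc) else acc) l0) := by
  induction L generalizing t0 l0 with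
  | nil => rfl
  | cons d L ih =>
    simp only [List.foldl_cons]
    by_cases h1 : pvInb n (r + d.1) (c + d.2) = true
    · by_cases h2 : (pvCell data (r + d.1) (c + d.2) == "|") = true
      · have h3 : ¬ ((pvCell data (r + d.1) (c + d.2) == "#") = true) := by
          simp only [beq_iff_eq] at h2 ⊢; simp [h2]
        simp only [if_pos h1, if_pos h2, if_neg h3]
        exact ih _ _
      · by_cases h3 : (pvCell data (r + d.1) (c + d.2) == "#") = true
        · simp only [if_pos h1, if_neg h2, if_pos h3]
          exact ih _ _
        · simp only [if_pos h1, if_neg h2, if_neg h3]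
          exact ih _ _
    · simp only [if_neg h1]
      exact ih _ _

theorem pvBothA_eq (data : List (List String)) (n r c : Int) :
    pvBothA data n r c = (pvTreesA data n r c, pvLumbersA data n r c) := by
  unfold pvBothA pvTreesA pvLumbersA
  exact pvBoth_split data n r c pvDirs 0 0

theorem pvTreesA_countP (data : List (List String)) (n r c : Int) :
    pvTreesA data n r c = (pvDirs.countP (fun d =>
      pvInb n (r + d.1) (c + d.2) && (pvCell data (r + d.1) (c + d.2) == "|")) : Int) := by
  unfold pvTreesA
  rw [PySem.List.foldl_congr_mem _ _
    (fun acc d => if pvInb n (r + d.1) (c + d.2) && (pvCell data (r + d.1) (c + d.2) == "|")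
      then acc + 1 else acc) _ ?_]
  · rw [PySem.List.foldl_if_add_one]
    simp
  · intro acc x _
    by_cases h1 : pvInb n (r + x.1) (c + x.2) = true <;>
      by_cases h2 : (pvCell data (r + x.1) (c + x.2) == "|") = true <;>
        simp [h1, h2]

theorem pvLumbersA_countP (data : List (List String)) (n r c : Int) :
    pvLumbersA data n r c = (pvDirs.countP (fun d =>
      pvInb n (r + d.1) (c + d.2) && (pvCell data (r + d.1) (c + d.2) == "#")) : Int) := by
  unfold pvLumbersA
  rw [PySem.List.foldl_congr_mem _ _
    (fun acc d => if pvInb n (r + d.1) (c + d.2) && (pvCell data (r + d.1) (c + d.2) == "#")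
      then acc + 1 else acc) _ ?_]
  · rw [PySem.List.foldl_if_add_one]
    simp
  · intro acc x _
    by_cases h1 : pvInb n (r + x.1) (c + x.2) = true <;>
      by_cases h2 : (pvCell data (r + x.1) (c + x.2) == "#") = true <;>
        simp [h1, h2]

theorem pvMem_IdxList (m : Nat) (x : Int) : x ∈ pvIdxList m ↔ 0 ≤ x ∧ x < m := by
  simp only [pvIdxList, List.mem_map, List.mem_range]
  constructor
  · rintro ⟨k, hk, rfl⟩; omega
  · intro ⟨h0, hm⟩; exact ⟨x.toNat, by omega, by omega⟩

theorem pvNodup_IdxList (m : Nat) : (pvIdxList m).Nodup :=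
  List.Nodup.map (fun a b h => by exact_mod_cast h) (List.nodup_range)

-- pass 1, inner loop: effect of one cell's scatter on a fixed key
theorem pvScatFold_getD (n i j : Int) (L : List (Int × Int)) (d : PySem.Dict (Int × Int) Int)
    (k : Int × Int) :
    (L.foldl (fun d dd =>
      let a := i + dd.1
      let b := j + dd.2
      if pvInb n a b then d.insert (a, b) (d.getD (a, b) 0 + 1) else d) d).getD k 0
    = d.getD k 0 + (L.countP (fun dd =>
        pvInb n (i + dd.1) (j + dd.2) && ((i + dd.1, j + dd.2) == k)) : Int) := by
  induction L generalizing d with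
  | nil => simp
  | cons dd L ih =>
    simp only [List.foldl_cons, List.countP_cons]
    by_cases h1 : pvInb n (i + dd.1) (j + dd.2) = true
    · simp only [if_pos h1]
      rw [ih]
      by_cases h2 : ((i + dd.1, j + dd.2) == k) = true
      · have hk : k = (i + dd.1, j + dd.2) := by
          have := beq_iff_eq.mp h2; exact this.symm
        rw [PySem.Dict.getD_insert]
        rw [if_pos hk, hk]
        simp only [h1, beq_self_eq_true, Bool.and_self]
        push_cast
        ring
      · rw [PySem.Dict.getD_insert, if_neg (by
          intro hk; apply h2; rw [hk]; exact beq_self_eq_true _)]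
        have : (pvInb n (i + dd.1) (j + dd.2) && ((i + dd.1, j + dd.2) == k)) = false := by
          simp only [Bool.not_eq_true] at h2; simp [h2]
        rw [this]
        push_cast
        ring
    · simp only [if_neg h1]
      rw [ih]
      have : (pvInb n (i + dd.1) (j + dd.2) && ((i + dd.1, j + dd.2) == k)) = false := by
        simp only [Bool.not_eq_true] at h1; simp [h1]
      rw [this]
      push_cast
      ring

theorem pvScatOne_getD (n i j : Int) (d : PySem.Dict (Int × Int) Int) (k : Int × Int) :
    (pvScatOne n i j d).getD k 0
    = d.getD k 0 + (pvDirs.countP (fun dd =>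
        pvInb n (i + dd.1) (j + dd.2) && ((i + dd.1, j + dd.2) == k)) : Int) :=
  pvScatFold_getD n i j pvDirs d k

-- pass 1, flattening the double loop over the grid into one loop over cell coordinates
theorem pvScatter_prod (data : List (List String)) (n : Int) (l1 l2 : List Int)
    (init : PySem.Dict (Int × Int) Int × PySem.Dict (Int × Int) Int) :
    l1.foldl (fun tl r => l2.foldl (fun tl c =>
      let cell := pvCell data r c
      if cell == "|" then (pvScatOne n r c tl.1, tl.2)
      else if cell == "#" then (tl.1, pvScatOne n r c tl.2)
      else tl) tl) init
    = (l1 ×ˢ l2).foldl (fun tl rc =>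
        if pvCell data rc.1 rc.2 == "|" then (pvScatOne n rc.1 rc.2 tl.1, tl.2)
        else if pvCell data rc.1 rc.2 == "#" then (tl.1, pvScatOne n rc.1 rc.2 tl.2)
        else tl) init := by
  induction l1 generalizing init with
  | nil => rfl
  | cons a l1 ih =>
    rw [List.foldl_cons, List.product_cons, List.foldl_append, List.foldl_map, ih]

-- pass 1, outer loop: the tree-count dictionary after scattering a list of cells
theorem pvCellsFold_T (data : List (List String)) (n : Int) (k : Int × Int)
    (L : List (Int × Int)) :
    ∀ (t0 l0 : PySem.Dict (Int × Int) Int),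
    ((L.foldl (fun tl rc =>
        if pvCell data rc.1 rc.2 == "|" then (pvScatOne n rc.1 rc.2 tl.1, tl.2)
        else if pvCell data rc.1 rc.2 == "#" then (tl.1, pvScatOne n rc.1 rc.2 tl.2)
        else tl) (t0, l0)).1).getD k 0
    = t0.getD k 0 + ((L.map (fun rc => pvDirs.countP (fun dd =>
        (pvCell data rc.1 rc.2 == "|") && pvInb n (rc.1 + dd.1) (rc.2 + dd.2)
          && ((rc.1 + dd.1, rc.2 + dd.2) == k)))).sum : Int) := by
  induction L with
  | nil => intro t0 l0; simp
  | cons rc L ih =>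
    intro t0 l0
    simp only [List.foldl_cons, List.map_cons, List.sum_cons]
    by_cases h1 : (pvCell data rc.1 rc.2 == "|") = true
    · simp only [if_pos h1]
      rw [ih]
      rw [pvScatOne_getD]
      have : ∀ dd : Int × Int,
          ((pvCell data rc.1 rc.2 == "|") && pvInb n (rc.1 + dd.1) (rc.2 + dd.2)
            && ((rc.1 + dd.1, rc.2 + dd.2) == k))
          = (pvInb n (rc.1 + dd.1) (rc.2 + dd.2) && ((rc.1 + dd.1, rc.2 + dd.2) == k)) := by
        intro dd; rw [h1]; simp
      have hcnt : pvDirs.countP (fun dd =>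
          (pvCell data rc.1 rc.2 == "|") && pvInb n (rc.1 + dd.1) (rc.2 + dd.2)
            && ((rc.1 + dd.1, rc.2 + dd.2) == k))
          = pvDirs.countP (fun dd =>
            pvInb n (rc.1 + dd.1) (rc.2 + dd.2) && ((rc.1 + dd.1, rc.2 + dd.2) == k)) :=
        List.countP_congr (fun dd _ => by rw [this dd])
      rw [hcnt]
      push_cast
      ring
    · have h1' : (pvCell data rc.1 rc.2 == "|") = false := by
        simpa using h1
      have hz : pvDirs.countP (fun dd =>
          (pvCell data rc.1 rc.2 == "|") && pvInb n (rc.1 + dd.1) (rc.2 + dd.2)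
            && ((rc.1 + dd.1, rc.2 + dd.2) == k)) = 0 := by
        apply List.countP_eq_zero.mpr
        intro dd _
        simp [h1']
      rw [hz]
      have hn : ¬ ((pvCell data rc.1 rc.2 == "|") = true) := by simp [h1']
      by_cases h2 : (pvCell data rc.1 rc.2 == "#") = true
      · simp only [if_neg hn, if_pos h2]
        rw [ih]
        push_cast
        ring
      · simp only [if_neg hn, if_neg (by simpa using h2 : ¬ ((pvCell data rc.1 rc.2 == "#") = true))]
        rw [ih]
        push_cast
        ring

-- pass 1, outer loop: the lumber-count dictionary after scattering a list of cells
theorem pvCellsFold_L (data : List (List String)) (n : Int) (k : Int × Int)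
    (L : List (Int × Int)) :
    ∀ (t0 l0 : PySem.Dict (Int × Int) Int),
    ((L.foldl (fun tl rc =>
        if pvCell data rc.1 rc.2 == "|" then (pvScatOne n rc.1 rc.2 tl.1, tl.2)
        else if pvCell data rc.1 rc.2 == "#" then (tl.1, pvScatOne n rc.1 rc.2 tl.2)
        else tl) (t0, l0)).2).getD k 0
    = l0.getD k 0 + ((L.map (fun rc => pvDirs.countP (fun dd =>
        (pvCell data rc.1 rc.2 == "#") && pvInb n (rc.1 + dd.1) (rc.2 + dd.2)
          && ((rc.1 + dd.1, rc.2 + dd.2) == k)))).sum : Int) := by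
  induction L with
  | nil => intro t0 l0; simp
  | cons rc L ih =>
    intro t0 l0
    simp only [List.foldl_cons, List.map_cons, List.sum_cons]
    by_cases h2 : (pvCell data rc.1 rc.2 == "#") = true
    · have h1' : (pvCell data rc.1 rc.2 == "|") = false := by
        have := beq_iff_eq.mp h2; simp [this]
      have hn : ¬ ((pvCell data rc.1 rc.2 == "|") = true) := by simp [h1']
      simp only [if_neg hn, if_pos h2]
      rw [ih]
      rw [pvScatOne_getD]
      have : ∀ dd : Int × Int,
          ((pvCell data rc.1 rc.2 == "#") && pvInb n (rc.1 + dd.1) (rc.2 + dd.2)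
            && ((rc.1 + dd.1, rc.2 + dd.2) == k))
          = (pvInb n (rc.1 + dd.1) (rc.2 + dd.2) && ((rc.1 + dd.1, rc.2 + dd.2) == k)) := by
        intro dd; rw [h2]; simp
      have hcnt : pvDirs.countP (fun dd =>
          (pvCell data rc.1 rc.2 == "#") && pvInb n (rc.1 + dd.1) (rc.2 + dd.2)
            && ((rc.1 + dd.1, rc.2 + dd.2) == k))
          = pvDirs.countP (fun dd =>
            pvInb n (rc.1 + dd.1) (rc.2 + dd.2) && ((rc.1 + dd.1, rc.2 + dd.2) == k)) :=
        List.countP_congr (fun dd _ => by rw [this dd])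
      rw [hcnt]
      push_cast
      ring
    · have hz : pvDirs.countP (fun dd =>
          (pvCell data rc.1 rc.2 == "#") && pvInb n (rc.1 + dd.1) (rc.2 + dd.2)
            && ((rc.1 + dd.1, rc.2 + dd.2) == k)) = 0 := by
        apply List.countP_eq_zero.mpr
        intro dd _
        simp [(by simpa using h2 : (pvCell data rc.1 rc.2 == "#") = false)]
      rw [hz]
      by_cases h1 : (pvCell data rc.1 rc.2 == "|") = true
      · simp only [if_pos h1]
        rw [ih]
        push_cast
        ring
      · simp only [if_neg (by simpa using h1 : ¬ ((pvCell data rc.1 rc.2 == "|") = true)),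
          if_neg (by simpa using h2 : ¬ ((pvCell data rc.1 rc.2 == "#") = true))]
        rw [ih]
        push_cast
        ring

-- exchanging the two summations of a count over a product
theorem pvSumSwap {α β : Type} (L1 : List α) (L2 : List β) (P : α → β → Bool) :
    (L1.map (fun a => L2.countP (P a))).sum = (L2.map (fun b => L1.countP (fun a => P a b))).sum := by
  induction L2 with
  | nil => simp
  | cons b L2 ih =>
    simp only [List.map_cons, List.sum_cons, List.countP_cons]
    rw [← ih, List.sum_map_add]
    rw [Nat.add_comm]
    congr 1
    rw [PySem.List.sum_map_ite_one_zero_nat]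

-- a count whose predicate pins the element down
theorem pvCountP_pin {α : Type} [BEq α] [LawfulBEq α] (L : List α) (hnd : L.Nodup) (a : α)
    (g : Bool) :
    L.countP (fun x => x == a && g) = if a ∈ L ∧ g = true then 1 else 0 := by
  cases g with
  | false =>
    rw [List.countP_eq_zero.mpr (by intro x _; simp)]
    simp
  | true =>
    have : L.countP (fun x => x == a && true) = L.countP (· == a) :=
      List.countP_congr (fun x _ => by simp)
    rw [this, ← List.count_eq_countP]
    by_cases hm : a ∈ L
    · rw [List.count_eq_one_of_mem hnd hm, if_pos ⟨hm, rfl⟩]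
    · rw [List.count_eq_zero.mpr hm, if_neg (by tauto)]

theorem pvInb_true (n0 r c : Nat) (hr : r < n0) (hc : c < n0) :
    pvInb (n0 : Int) (r : Int) (c : Int) = true := by
  simp [pvInb]
  omega

theorem pvMem_cells (n0 : Nat) (a : Int × Int) :
    a ∈ (pvIdxList n0 ×ˢ pvIdxList n0) ↔ pvInb (n0 : Int) a.1 a.2 = true := by
  have h := @List.mem_product Int Int (pvIdxList n0) (pvIdxList n0) a.1 a.2
  constructor
  · intro hm
    obtain ⟨h1, h2⟩ := h.mp hm
    rw [pvMem_IdxList] at h1 h2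
    simp [pvInb]
    omega
  · intro hb
    simp [pvInb] at hb
    exact h.mpr ⟨(pvMem_IdxList n0 a.1).mpr (by omega),
      (pvMem_IdxList n0 a.2).mpr (by omega)⟩

theorem pvNodup_cells (n0 : Nat) : (pvIdxList n0 ×ˢ pvIdxList n0).Nodup :=
  List.Nodup.product (pvNodup_IdxList n0) (pvNodup_IdxList n0)

theorem pvCellsSum_eval (data : List (List String)) (n0 : Nat) (t : String) (r c : Nat)
    (hr : r < n0) (hc : c < n0) :
    ((pvIdxList n0 ×ˢ pvIdxList n0).map (fun rc => pvDirs.countP (fun dd =>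
        (pvCell data rc.1 rc.2 == t) && pvInb (n0 : Int) (rc.1 + dd.1) (rc.2 + dd.2)
          && ((rc.1 + dd.1, rc.2 + dd.2) == ((r : Int), (c : Int)))))).sum
    = pvDirs.countP (fun d => pvInb (n0 : Int) ((r : Int) + d.1) ((c : Int) + d.2)
        && (pvCell data ((r : Int) + d.1) ((c : Int) + d.2) == t)) := by
  rw [pvSumSwap (pvIdxList n0 ×ˢ pvIdxList n0) pvDirs (fun rc dd =>
        (pvCell data rc.1 rc.2 == t) && pvInb (n0 : Int) (rc.1 + dd.1) (rc.2 + dd.2)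
          && ((rc.1 + dd.1, rc.2 + dd.2) == ((r : Int), (c : Int))))]
  -- evaluate the inner count for each fixed direction
  have hpin : ∀ dd : Int × Int,
      (pvIdxList n0 ×ˢ pvIdxList n0).countP (fun rc =>
        (pvCell data rc.1 rc.2 == t) && pvInb (n0 : Int) (rc.1 + dd.1) (rc.2 + dd.2)
          && ((rc.1 + dd.1, rc.2 + dd.2) == ((r : Int), (c : Int))))
      = if pvInb (n0 : Int) ((r : Int) - dd.1) ((c : Int) - dd.2)
            && (pvCell data ((r : Int) - dd.1) ((c : Int) - dd.2) == t) then 1 else 0 := by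
    intro dd
    have hpt : ∀ rc : Int × Int,
        ((pvCell data rc.1 rc.2 == t) && pvInb (n0 : Int) (rc.1 + dd.1) (rc.2 + dd.2)
          && ((rc.1 + dd.1, rc.2 + dd.2) == ((r : Int), (c : Int))))
        = (rc == (((r : Int) - dd.1, (c : Int) - dd.2) : Int × Int)
            && (pvCell data ((r : Int) - dd.1) ((c : Int) - dd.2) == t)) := by
      intro rc
      by_cases he : rc = (((r : Int) - dd.1, (c : Int) - dd.2) : Int × Int)
      · subst he
        have h1 : ((r : Int) - dd.1) + dd.1 = (r : Int) := by ring
        have h2 : ((c : Int) - dd.2) + dd.2 = (c : Int) := by ring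
        simp only [h1, h2]
        rw [pvInb_true n0 r c hr hc]
        simp
      · have hb : (rc == (((r : Int) - dd.1, (c : Int) - dd.2) : Int × Int)) = false := by
          simpa using he
        rw [hb]
        have hne : ((rc.1 + dd.1, rc.2 + dd.2) == ((r : Int), (c : Int))) = false := by
          apply beq_eq_false_iff_ne.mpr
          intro hcon
          apply he
          have h1 : rc.1 + dd.1 = (r : Int) := congrArg Prod.fst hcon
          have h2 : rc.2 + dd.2 = (c : Int) := congrArg Prod.snd hcon
          have : rc = (rc.1, rc.2) := rfl
          rw [this]
          have : rc.1 = (r : Int) - dd.1 := by omega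
          have h2' : rc.2 = (c : Int) - dd.2 := by omega
          rw [this, h2']
        rw [hne]
        simp
    rw [List.countP_congr (fun rc _ => by rw [hpt rc])]
    rw [pvCountP_pin _ (pvNodup_cells n0)]
    by_cases hin : pvInb (n0 : Int) ((r : Int) - dd.1) ((c : Int) - dd.2) = true
    · by_cases hg : (pvCell data ((r : Int) - dd.1) ((c : Int) - dd.2) == t) = true
      · rw [if_pos ⟨(pvMem_cells n0 _).mpr hin, hg⟩, if_pos (by rw [hin, hg]; rfl)]
      · rw [if_neg (by intro h; exact hg h.2), if_neg (by
          intro h; apply hg; have := (Bool.and_eq_true _ _).mp h; exact this.2)]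
    · rw [if_neg (by intro h; exact hin ((pvMem_cells n0 _).mp h.1)), if_neg (by
        intro h; apply hin; have := (Bool.and_eq_true _ _).mp h; exact this.1)]
  rw [List.map_congr_left (fun dd _ => hpin dd)]
  rw [PySem.List.sum_map_ite_one_zero_nat]
  -- replace each direction by its negative (the direction set is symmetric)
  have hrev : pvDirs.map (fun dd => ((-dd.1, -dd.2) : Int × Int)) = pvDirs.reverse := by decide
  have hcomp : pvDirs.countP (fun dd =>
      pvInb (n0 : Int) ((r : Int) - dd.1) ((c : Int) - dd.2)
        && (pvCell data ((r : Int) - dd.1) ((c : Int) - dd.2) == t))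
      = (pvDirs.map (fun dd => ((-dd.1, -dd.2) : Int × Int))).countP (fun d =>
        pvInb (n0 : Int) ((r : Int) + d.1) ((c : Int) + d.2)
          && (pvCell data ((r : Int) + d.1) ((c : Int) + d.2) == t)) := by
    rw [List.countP_map]
    apply List.countP_congr
    intro dd _
    have h1 : (r : Int) + -dd.1 = (r : Int) - dd.1 := by ring
    have h2 : (c : Int) + -dd.2 = (c : Int) - dd.2 := by ring
    simp only [Function.comp_apply, h1, h2]
  rw [hcomp, hrev, List.countP_reverse]

theorem pvScatter_getD_T (data : List (List String)) (n0 r c : Nat) (hr : r < n0)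
    (hc : c < n0) :
    (pvScatter data (n0 : Int)).1.getD ((r : Int), (c : Int)) 0
      = pvTreesA data (n0 : Int) (r : Int) (c : Int) := by
  unfold pvScatter
  rw [pvRange_cast, pvScatter_prod, pvCellsFold_T, PySem.Dict.getD_empty]
  rw [pvCellsSum_eval data n0 "|" r c hr hc]
  rw [pvTreesA_countP]
  ring

theorem pvScatter_getD_L (data : List (List String)) (n0 r c : Nat) (hr : r < n0)
    (hc : c < n0) :
    (pvScatter data (n0 : Int)).2.getD ((r : Int), (c : Int)) 0
      = pvLumbersA data (n0 : Int) (r : Int) (c : Int) := by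
  unfold pvScatter
  rw [pvRange_cast, pvScatter_prod, pvCellsFold_L, PySem.Dict.getD_empty]
  rw [pvCellsSum_eval data n0 "#" r c hr hc]
  rw [pvLumbersA_countP]
  ring

theorem pvCell_good (data : List (List String)) (n0 : Nat) (hg : pvGood n0 data)
    (r c : Nat) (hr : r < n0) (hc : c < n0) :
    pvCell data (r : Int) (c : Int) = "." ∨ pvCell data (r : Int) (c : Int) = "|"
      ∨ pvCell data (r : Int) (c : Int) = "#" := by
  obtain ⟨hrl, hcells⟩ := pvGood_row data n0 hg r hr
  rw [pvCell_natCast]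
  have hcl : c < (data.getD r []).length := by omega
  rw [List.getD_eq_getElem _ "" hcl]
  apply hcells
  have ht : c < ((data.getD r []).take n0).length := by
    rw [List.length_take]
    omega
  have := List.getElem_take (xs := data.getD r []) (i := c) (h := ht)
  rw [← this]
  exact List.getElem_mem ht

-- B wrote at (r, c) the rule value; A wrote only on a change: the results agree on the block
theorem pvWrite_vs (data : List (List String)) (n0 : Nat) (hg : pvGood n0 data)
    (r c : Nat) (hr : r < n0) (hc : c < n0) :
    (pvWrite data (n0 : Int) (r : Int) (c : Int)).getD (pvCell data (r : Int) (c : Int))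
      = (pvWriteB data (n0 : Int) (r : Int) (c : Int)).getD (pvCell data (r : Int) (c : Int)) := by
  simp only [pvWrite, pvWriteB]
  rw [pvScatter_getD_T data n0 r c hr hc, pvScatter_getD_L data n0 r c hr hc]
  simp only [pvBothA_eq]
  rcases pvCell_good data n0 hg r c hr hc with h | h | h <;>
    rw [h] <;> split_ifs <;> simp_all

theorem pvStep_eq (data : List (List String)) (n0 : Nat) (hg : pvGood n0 data) :
    pvTakeStepA data (n0 : Int) = pvTakeStepB data (n0 : Int) := by
  rw [pvTakeStepA_eq_fold data n0, pvTakeStepB_eq_fold data n0]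
  obtain ⟨hAl, hAg⟩ := pvAFold_spec data (n0 : Int) n0 hg.1 n0 le_rfl
  obtain ⟨hBl, hBg⟩ := pvBFold_spec data (n0 : Int) n0 hg.1 n0 le_rfl
  apply List.ext_getElem (by rw [hAl, hBl])
  intro i h1 h2
  have hi : i < n0 := by omega
  rw [← List.getD_eq_getElem _ [] h1, ← List.getD_eq_getElem _ [] h2,
    hAg i hi [], hBg i hi [], if_pos hi, if_pos hi]
  obtain ⟨hrl, _⟩ := pvGood_row data n0 hg i hi
  unfold pvRowA pvRowB
  simp only [Int.toNat_natCast]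
  apply List.ext_getElem (by rw [pvRowFold_length, pvRowFold_length])
  intro j hj1 hj2
  have hjlen : j < (data.getD i []).length := by
    have := pvRowFold_length (pvWrite data (n0 : Int) (i : Int)) (pvIdxList n0) (data.getD i [])
    omega
  rw [← List.getD_eq_getElem _ "" hj1, ← List.getD_eq_getElem _ "" hj2]
  rw [pvRowFold_getD _ n0 _ "" (by omega) j hjlen,
    pvRowFold_getD _ n0 _ "" (by omega) j hjlen]
  by_cases hjn : j < n0
  · rw [if_pos hjn, if_pos hjn, ← pvCell_natCast data i j]
    exact pvWrite_vs data n0 hg i j hi hjn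
  · rw [if_neg hjn, if_neg hjn]

theorem pvStepB_good (data : List (List String)) (n0 : Nat) (hg : pvGood n0 data) :
    pvGood n0 (pvTakeStepB data (n0 : Int)) := by
  rw [pvTakeStepB_eq_fold data n0]
  obtain ⟨hBl, hBg⟩ := pvBFold_spec data (n0 : Int) n0 hg.1 n0 le_rfl
  refine ⟨hBl, ?_⟩
  intro row hrow
  obtain ⟨i, hi, rfl⟩ := List.mem_iff_getElem.mp hrow
  have hi0 : i < n0 := by omega
  have hrowval : (pvBFoldF data (n0 : Int) n0 n0)[i] = pvRowB data (n0 : Int) n0 (i : Int) := by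
    rw [← List.getD_eq_getElem _ [] hi, hBg i hi0 [], if_pos hi0]
  rw [hrowval]
  obtain ⟨hrl, hcells⟩ := pvGood_row data n0 hg i hi0
  have hlen : (pvRowB data (n0 : Int) n0 (i : Int)).length = (data.getD i []).length := by
    unfold pvRowB
    simp only [Int.toNat_natCast]
    exact pvRowFold_length _ _ _
  refine ⟨by omega, ?_⟩
  intro s hs
  obtain ⟨j, hj, rfl⟩ := List.mem_iff_getElem.mp hs
  have hjn : j < n0 := by
    simp [List.length_take] at hj
    omega
  have hjr : j < (pvRowB data (n0 : Int) n0 (i : Int)).length := by omega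
  rw [List.getElem_take, ← List.getD_eq_getElem _ "" hjr]
  unfold pvRowB
  simp only [Int.toNat_natCast]
  rw [pvRowFold_getD _ n0 _ "" (by omega) j (by omega), if_pos hjn,
    ← pvCell_natCast data i j]
  rcases pvCell_good data n0 hg i j hi0 hjn with h | h | h <;>
    simp only [pvWriteB, h] <;> split_ifs <;> simp_all

theorem pvLoop_eq (n0 : Nat) : ∀ (fuel : Nat) (seens : PySem.Dict String Int) (minute : Int)
    (data : List (List String)), pvGood n0 data →
    pvLoopA fuel seens minute data (n0 : Int) = pvLoopB fuel seens minute data (n0 : Int) ∧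
      pvGood n0 (pvLoopB fuel seens minute data (n0 : Int)).1 := by
  intro fuel
  induction fuel with
  | zero =>
    intro seens minute data hg
    exact ⟨rfl, hg⟩
  | succ fuel ih =>
    intro seens minute data hg
    simp only [pvLoopA, pvLoopB]
    cases h : seens.get? (pvHash data) with
    | some first => exact ⟨rfl, hg⟩
    | none =>
      rw [pvStep_eq data n0 hg]
      exact ih _ _ _ (pvStepB_good data n0 hg)

theorem pvIter_eq (n0 : Nat) : ∀ (L : List Int) (data : List (List String)),
    pvGood n0 data →
    L.foldl (fun d _ => pvTakeStepA d (n0 : Int)) data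
      = L.foldl (fun d _ => pvTakeStepB d (n0 : Int)) data := by
  intro L
  induction L with
  | nil => intro data _; rfl
  | cons x L ih =>
    intro data hg
    simp only [List.foldl_cons]
    rw [pvStep_eq data n0 hg]
    exact ih _ (pvStepB_good data n0 hg)

-- ===== VERDICT (by name: the statement is the Claim_ definition above) =====
theorem fast_forward_spec : Claim_equal_fast_forward := by
  unfold Claim_equal_fast_forward
  intro data _ hpre
  unfold Spec_fast_forward
  have hg : pvGood data.length data := ⟨rfl, hpre⟩
  simp only [fast_forward, fast_forward_alt]
  obtain ⟨heq, hgood⟩ := pvLoop_eq data.length (pvFuel data) PySem.Dict.empty 0 data hg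
  rw [heq]
  rw [pvIter_eq data.length _ _ hgood]
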